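-- pv_equiv track=rewrite | github.com/Rbcc499/Constellation-Protein-Distribution-Analysis | code/map_analysis.py | _find_anchor
-- ===== SOURCE A (Python) =====
-- from typing import Dict, List, Tuple, Optional
--
-- def _find_anchor(proteins: List[str], directed_pairs: List[Tuple[str, str]]) -> str:
--     """Pick a protein that has outgoing edges to all others if possible; otherwise best out-degree."""
--     out = {p: 0 for p in proteins}
--     out_edges = {p: set() for p in proteins}
--     for a, b in directed_pairs:
--         if a in out:
--             out[a] += 1
--             out_edges[a].add(b)
--
--     # Prefer full coverage
--     for p in proteins:
--         if out_edges[p] >= (set(proteins) - {p}):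
--             return p
--
--     # Otherwise, max out-degree
--     return max(proteins, key=lambda p: out[p])
-- ===== SOURCE B (Python) =====
-- from typing import List, Tuple
--
-- def _find_anchor(proteins: List[str], directed_pairs: List[Tuple[str, str]]) -> str:
--     """Pick a protein that has outgoing edges to all others if possible; otherwise best out-degree."""
--     # Successive elimination: each protein q removes from the candidate list every
--     # protein (other than q itself) that has no edge into q; survivors cover everyone.
--     candidates = list(proteins)
--     for q in proteins:
--         sources = {a for a, b in directed_pairs if b == q}
--         candidates = [p for p in candidates if p == q or p in sources]
--     if candidates:
--         return candidates[0]
--     # Otherwise, max out-degree: count once, then keep the first strict maximum.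
--     counts = {}
--     for a, _ in directed_pairs:
--         counts[a] = counts.get(a, 0) + 1
--     best = proteins[0]
--     best_deg = -1
--     for p in proteins:
--         d = counts.get(p, 0)
--         if d > best_deg:
--             best, best_deg = p, d
--     return best
-- ===== Notes on version B (the rewrite author's own statement) =====
-- stated objective: alternative
-- what changed: Replaces A's per-candidate outgoing-edge-set superset test (which rebuilds set(proteins) for every candidate) with a successive-elimination pass over incoming edges that shrinks one candidate list, and replaces the keyed max with a counting dict plus an explicit first-strict-maximum scan.
import Mathlib
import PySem

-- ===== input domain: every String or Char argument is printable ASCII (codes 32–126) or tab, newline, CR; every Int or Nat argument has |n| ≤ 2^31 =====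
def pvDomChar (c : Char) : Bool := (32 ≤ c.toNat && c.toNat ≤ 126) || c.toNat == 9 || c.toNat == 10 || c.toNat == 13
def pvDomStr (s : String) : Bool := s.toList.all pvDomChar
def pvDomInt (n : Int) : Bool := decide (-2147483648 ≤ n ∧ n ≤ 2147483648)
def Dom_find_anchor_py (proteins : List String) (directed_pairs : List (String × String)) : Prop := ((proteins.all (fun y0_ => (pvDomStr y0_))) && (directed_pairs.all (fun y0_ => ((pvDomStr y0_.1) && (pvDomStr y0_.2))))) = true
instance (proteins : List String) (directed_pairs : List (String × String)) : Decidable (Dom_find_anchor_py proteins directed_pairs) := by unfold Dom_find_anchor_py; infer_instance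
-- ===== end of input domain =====

-- B replaces A's per-candidate superset test with successive elimination over incoming edges plus a counting-dict fallback scan (alternative algorithm, same return value; empty `proteins` raises in both and is excluded by Pre_).


-- ===== PORT A =====
-- the body of A's 'for a, b in directed_pairs' loop over the state (out, out_edges)
def pvEdgeStep (s : PySem.Dict String Int × PySem.Dict String (PySem.Set String))
    (ab : String × String) : PySem.Dict String Int × PySem.Dict String (PySem.Set String) :=
  if s.1.contains ab.1 then
    (s.1.modify ab.1 0 (· + 1), s.2.modify ab.1 PySem.Set.empty (fun t => PySem.Set.add t ab.2))
  else s

-- A's 'for p in proteins: if out_edges[p] >= set(proteins) - {p}: return p'.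
-- out_edges[p] is exact as getD here: every p iterated over is a key of out_edges.
def pvCoverA (proteins : List String) (oe : PySem.Dict String (PySem.Set String)) :
    List String → Option String
  | [] => none
  | p :: rest =>
    if PySem.Set.issuperset (oe.getD p PySem.Set.empty)
        (PySem.Set.diff (PySem.Set.ofList proteins) (PySem.Set.ofList [p])) then some p
    else pvCoverA proteins oe rest

-- Python's max(xs, key=f): first element whose key is maximal.
-- On [] Python raises ValueError; that input is excluded by Pre_ below.
def pvPyMax (f : String → Int) : List String → String
  | [] => ""
  | h :: t => t.foldl (fun best q => if f q > f best then q else best) h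

def find_anchor_py (proteins : List String) (directed_pairs : List (String × String)) : String :=
  let out : PySem.Dict String Int :=
    proteins.foldl (fun d p => d.insert p 0) PySem.Dict.empty
  let out_edges : PySem.Dict String (PySem.Set String) :=
    proteins.foldl (fun d p => d.insert p PySem.Set.empty) PySem.Dict.empty
  let st := directed_pairs.foldl pvEdgeStep (out, out_edges)
  match pvCoverA proteins st.2 proteins with
  | some p => p
  | none => pvPyMax (fun p => st.1.getD p 0) proteins   -- out[p] exact as getD: p ∈ proteins is a key

-- ===== PORT B =====
-- B's elimination step: protein q keeps only candidates equal to q or with an edge into q.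
def pvElimStep (directed_pairs : List (String × String)) (cands : List String) (q : String) :
    List String :=
  let sources : PySem.Set String :=
    PySem.Set.ofList ((directed_pairs.filter (fun ab => ab.2 == q)).map (·.1))
  cands.filter (fun p => p == q || PySem.Set.contains sources p)

def find_anchor_py_alt (proteins : List String) (directed_pairs : List (String × String)) : String :=
  let candidates := proteins.foldl (pvElimStep directed_pairs) proteins
  match candidates with
  | p :: _ => p
  | [] =>
    -- counts[a] = counts.get(a, 0) + 1 over the pairs
    let counts : PySem.Dict String Int :=
      directed_pairs.foldl (fun d ab => d.insert ab.1 (d.getD ab.1 0 + 1)) PySem.Dict.empty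
    match proteins with
    | [] => ""   -- Python raises IndexError at proteins[0]; excluded by Pre_
    | h :: _ =>
      (proteins.foldl
        (fun (s : String × Int) p =>
          if counts.getD p 0 > s.2 then (p, counts.getD p 0) else s) (h, -1)).1

-- ===== PRECONDITION & SPEC =====
-- Pre_ excludes only proteins = [], where A raises ValueError (max of empty) and B IndexError.
def Pre_find_anchor_py (proteins : List String) (directed_pairs : List (String × String)) : Prop :=
  proteins ≠ []
instance (proteins : List String) (directed_pairs : List (String × String)) : Decidable (Pre_find_anchor_py proteins directed_pairs) := by unfold Pre_find_anchor_py; infer_instance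

def pvWitness_find_anchor_py : List String × (List (String × String)) :=
  (["a", "b"], [("a", "b"), ("b", "a"), ("a", "a")])

def Spec_find_anchor_py (proteins : List String) (directed_pairs : List (String × String)) (out : String) : Prop := out = find_anchor_py_alt proteins directed_pairs
instance (proteins : List String) (directed_pairs : List (String × String)) (out : String) : Decidable (Spec_find_anchor_py proteins directed_pairs out) := by unfold Spec_find_anchor_py; infer_instance

-- ===== CLAIM (what is proved, stated in full; the proofs are below) =====
def Claim_equal_find_anchor_py : Prop := ∀ (proteins : List String) (directed_pairs : List (String × String)), Dom_find_anchor_py proteins directed_pairs → Pre_find_anchor_py proteins directed_pairs → Spec_find_anchor_py proteins directed_pairs (find_anchor_py proteins directed_pairs)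

-- ===== LEMMAS AND PROOFS =====

-- the initial dicts: every key of proteins is present, with the constant initial value
lemma pv_contains_init {ν : Type} (l : List String) (v0 : ν) (x : String) :
    ((l.foldl (fun d p => d.insert p v0) PySem.Dict.empty).contains x = true) ↔ x ∈ l := by
  rw [PySem.Dict.contains_iff_mem_keys, PySem.Dict.keys_foldl_insert]
  simp [PySem.Set.mem_update, PySem.Dict.keys_empty]

lemma pv_getD_init {ν : Type} (l : List String) (v0 : ν) (d : PySem.Dict String ν)
    (h : ∀ x, d.getD x v0 = v0) (x : String) :
    (l.foldl (fun d p => d.insert p v0) d).getD x v0 = v0 := by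
  induction l generalizing d with
  | nil => exact h x
  | cons p rest ih =>
    refine ih (d.insert p v0) (fun y => ?_)
    rw [PySem.Dict.getD_insert]
    split_ifs <;> simp [h]

-- A's pair loop, counts: for a key p of out, out[p] after the loop counts the pairs with first component p
lemma pv_count_fold (dps : List (String × String)) (o : PySem.Dict String Int)
    (oe : PySem.Dict String (PySem.Set String)) (p : String) (hp : o.contains p = true) :
    (dps.foldl pvEdgeStep (o, oe)).1.getD p 0
      = o.getD p 0 + ((dps.filter (fun ab => ab.1 == p)).length : Int) := by
  induction dps generalizing o oe with
  | nil => simp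
  | cons ab rest ih =>
    obtain ⟨a, c⟩ := ab
    simp only [List.foldl_cons, pvEdgeStep]
    by_cases hc : o.contains a = true
    · rw [if_pos hc]
      have hp' : (o.modify a 0 (· + 1)).contains p = true := by
        rw [PySem.Dict.contains_modify]; simp [hp]
      rw [ih _ _ hp', PySem.Dict.getD_modify]
      by_cases hpe : p = a
      · subst hpe
        rw [if_pos rfl]
        simp only [List.filter_cons, beq_self_eq_true, if_true, List.length_cons]
        push_cast; ring
      · rw [if_neg hpe]
        have hne : (a == p) = false := beq_eq_false_iff_ne.mpr (fun h => hpe h.symm)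
        simp [hne]
    · rw [if_neg hc]
      have hne : (a == p) = false := by
        rcases Bool.eq_false_or_eq_true (a == p) with h | h
        · exact absurd (by rw [eq_of_beq h]; exact hp) hc
        · exact h
      rw [ih _ _ hp]
      simp [hne]

-- A's pair loop, edge sets: membership in out_edges[p] after the loop
lemma pv_mem_fold (dps : List (String × String)) (o : PySem.Dict String Int)
    (oe : PySem.Dict String (PySem.Set String)) (p b : String) (hp : o.contains p = true) :
    b ∈ (dps.foldl pvEdgeStep (o, oe)).2.getD p PySem.Set.empty
      ↔ b ∈ oe.getD p PySem.Set.empty ∨ (p, b) ∈ dps := by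
  induction dps generalizing o oe with
  | nil => simp
  | cons ab rest ih =>
    obtain ⟨a, c⟩ := ab
    simp only [List.foldl_cons, pvEdgeStep]
    by_cases hc : o.contains a = true
    · rw [if_pos hc]
      have hp' : (o.modify a 0 (· + 1)).contains p = true := by
        rw [PySem.Dict.contains_modify]; simp [hp]
      rw [ih _ _ hp', PySem.Dict.getD_modify]
      by_cases hpe : p = a
      · subst hpe
        rw [if_pos rfl, PySem.Set.mem_add]
        simp only [List.mem_cons, Prod.mk.injEq, true_and]
        tauto
      · rw [if_neg hpe]
        have hab : (p, b) ∈ (a, c) :: rest ↔ (p, b) ∈ rest := by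
          simp only [List.mem_cons, Prod.mk.injEq]
          tauto
        rw [hab]
    · rw [if_neg hc]
      have hpe : p ≠ a := fun h => hc (h ▸ hp)
      have hab : (p, b) ∈ (a, c) :: rest ↔ (p, b) ∈ rest := by
        simp only [List.mem_cons, Prod.mk.injEq]
        tauto
      rw [ih _ _ hp, hab]

-- B's source set for q: membership is being an edge into q
lemma pv_mem_sources (dps : List (String × String)) (q a : String) :
    a ∈ PySem.Set.ofList ((dps.filter (fun ab => ab.2 == q)).map (·.1)) ↔ (a, q) ∈ dps := by
  rw [PySem.Set.mem_ofList]
  simp only [List.mem_map, List.mem_filter]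
  constructor
  · rintro ⟨⟨x, y⟩, ⟨hm, he⟩, ha⟩
    simp only at he ha
    obtain rfl : y = q := eq_of_beq he
    obtain rfl : x = a := ha
    exact hm
  · intro h
    exact ⟨(a, q), ⟨h, by simp⟩, rfl⟩

-- B's whole elimination loop is one filter by 'survives every q of l'
lemma pv_elim_fold (dps : List (String × String)) (l : List String) :
    ∀ cands, l.foldl (pvElimStep dps) cands
      = cands.filter (fun p => l.all (fun q => p == q ||
          PySem.Set.contains
            (PySem.Set.ofList ((dps.filter (fun ab => ab.2 == q)).map (·.1))) p)) := by
  induction l with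
  | nil => intro cands; simp
  | cons q rest ih =>
    intro cands
    simp only [List.foldl_cons, pvElimStep, ih, List.filter_filter, List.all_cons]
    exact List.filter_congr (fun a _ => by rw [Bool.and_comm])

-- pvCoverA is find? of A's coverage test
lemma pv_coverA_find (proteins : List String) (oe : PySem.Dict String (PySem.Set String)) :
    ∀ l, pvCoverA proteins oe l
      = l.find? (fun p => PySem.Set.issuperset (oe.getD p PySem.Set.empty)
          (PySem.Set.diff (PySem.Set.ofList proteins) (PySem.Set.ofList [p]))) := by
  intro l
  induction l with
  | nil => rfl
  | cons p rest ih =>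
    simp only [pvCoverA]
    by_cases h : PySem.Set.issuperset (oe.getD p PySem.Set.empty)
        (PySem.Set.diff (PySem.Set.ofList proteins) (PySem.Set.ofList [p])) = true
    · rw [if_pos h]
      exact (List.find?_cons_of_pos
        (p := fun p => PySem.Set.issuperset (oe.getD p PySem.Set.empty)
          (PySem.Set.diff (PySem.Set.ofList proteins) (PySem.Set.ofList [p]))) h).symm
    · rw [if_neg h, ih]
      exact (List.find?_cons_of_neg
        (p := fun p => PySem.Set.issuperset (oe.getD p PySem.Set.empty)
          (PySem.Set.diff (PySem.Set.ofList proteins) (PySem.Set.ofList [p]))) h).symm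

-- find? respects pointwise equality on the list's members
lemma pv_find_congr (f g : String → Bool) (l : List String)
    (h : ∀ x ∈ l, f x = g x) : l.find? f = l.find? g := by
  induction l with
  | nil => rfl
  | cons p rest ih =>
    simp only [List.find?_cons, h p (List.mem_cons_self)]
    cases hg : g p with
    | true => rfl
    | false => exact ih (fun x hx => h x (List.mem_cons_of_mem _ hx))

-- find? is the head of the filter
lemma pv_find_eq_head_filter (f : String → Bool) (l : List String) :
    l.find? f = (l.filter f).head? := by
  induction l with
  | nil => rfl
  | cons p rest ih =>
    simp only [List.find?_cons, List.filter_cons]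
    cases hf : f p with
    | true => rfl
    | false => simpa using ih

-- Python max with equal keys on the traversed elements is the same element
lemma pv_max_congr (f g : String → Int) (l : List String) (best : String)
    (hl : ∀ x ∈ l, f x = g x) (hb : f best = g best) :
    l.foldl (fun best q => if f q > f best then q else best) best
      = l.foldl (fun best q => if g q > g best then q else best) best := by
  induction l generalizing best with
  | nil => rfl
  | cons q rest ih =>
    simp only [List.foldl_cons]
    have hq : f q = g q := hl q (List.mem_cons_self)
    rw [hq, hb]
    have hl' : ∀ x ∈ rest, f x = g x := fun x hx => hl x (List.mem_cons_of_mem _ hx)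
    split_ifs with h
    · exact ih _ hl' hq
    · exact ih _ hl' hb

-- B's (best, best_deg) pair loop tracks pvPyMax's fold together with its key
lemma pv_fold_max_pair (g : String → Int) (t : List String) (b : String) :
    t.foldl (fun s p => if g p > s.2 then (p, g p) else s) (b, g b)
      = (t.foldl (fun best q => if g q > g best then q else best) b,
         g (t.foldl (fun best q => if g q > g best then q else best) b)) := by
  induction t generalizing b with
  | nil => rfl
  | cons q rest ih =>
    simp only [List.foldl_cons]
    split_ifs with h
    · exact ih q
    · exact ih b

-- B's counts dict is Counter of the first components
lemma pv_counts_getD_gen (dps : List (String × String)) (p : String) :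
    ∀ d : PySem.Dict String Int,
    (dps.foldl (fun d ab => d.insert ab.1 (d.getD ab.1 0 + 1)) d).getD p 0
      = d.getD p 0 + (dps.countP (fun ab => ab.1 == p) : Int) := by
  induction dps with
  | nil => intro d; simp
  | cons ab rest ih =>
    intro d
    obtain ⟨a, c⟩ := ab
    simp only [List.foldl_cons, ih, PySem.Dict.getD_insert, List.countP_cons]
    by_cases hpa : p = a
    · subst hpa
      simp only [if_pos rfl, beq_self_eq_true, if_pos rfl]
      push_cast; ring
    · have hne : ((a, c).1 == p) = false := beq_eq_false_iff_ne.mpr (fun h => hpa h.symm)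
      simp only [if_neg hpa, hne]
      push_cast; ring

lemma pv_counts_getD (dps : List (String × String)) (p : String) :
    (dps.foldl (fun d ab => d.insert ab.1 (d.getD ab.1 0 + 1)) PySem.Dict.empty).getD p 0
      = (dps.countP (fun ab => ab.1 == p) : Int) := by
  rw [pv_counts_getD_gen dps p PySem.Dict.empty, PySem.Dict.getD_empty]
  ring

-- ===== VERDICT (by name: the statement is the Claim_ definition above) =====
theorem find_anchor_py_spec : Claim_equal_find_anchor_py := by
  intro proteins dps _ hpre
  have hout : ∀ p ∈ proteins,
      (proteins.foldl (fun d p => d.insert p (0 : Int)) PySem.Dict.empty).contains p = true :=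
    fun p hp => (pv_contains_init proteins 0 p).mpr hp
  set st := dps.foldl pvEdgeStep
      (proteins.foldl (fun d p => d.insert p (0 : Int)) PySem.Dict.empty,
       proteins.foldl (fun d p => d.insert p PySem.Set.empty) PySem.Dict.empty) with hst
  have hmem : ∀ p ∈ proteins, ∀ b,
      b ∈ st.2.getD p PySem.Set.empty ↔ (p, b) ∈ dps := by
    intro p hp b
    rw [hst, pv_mem_fold dps _ _ p b (hout p hp),
      pv_getD_init proteins PySem.Set.empty PySem.Dict.empty
        (fun x => PySem.Dict.getD_empty ..)]
    simp [PySem.Set.empty]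
  have hkey : ∀ p ∈ proteins,
      st.1.getD p 0 = (dps.countP (fun ab => ab.1 == p) : Int) := by
    intro p hp
    rw [hst, pv_count_fold dps _ _ p (hout p hp),
      pv_getD_init proteins 0 PySem.Dict.empty (fun x => PySem.Dict.getD_empty ..),
      List.countP_eq_length_filter]
    ring
  -- both selection phases are find?/head-of-filter of the same predicate
  have hcond : ∀ p ∈ proteins,
      (PySem.Set.issuperset (st.2.getD p PySem.Set.empty)
        (PySem.Set.diff (PySem.Set.ofList proteins) (PySem.Set.ofList [p])))
      = (proteins.all (fun q => p == q ||
          PySem.Set.contains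
            (PySem.Set.ofList ((dps.filter (fun ab => ab.2 == q)).map (·.1))) p)) := by
    intro p hp
    rw [Bool.eq_iff_iff, PySem.Set.issuperset_iff, List.all_eq_true]
    constructor
    · intro h q hq
      by_cases hpq : p = q
      · simp [hpq]
      · have hx : q ∈ PySem.Set.diff (PySem.Set.ofList proteins) (PySem.Set.ofList [p]) := by
          rw [PySem.Set.mem_diff, PySem.Set.mem_ofList, PySem.Set.mem_ofList]
          exact ⟨hq, by simpa using fun h' => hpq h'.symm⟩
        have := (hmem p hp q).mp (h q hx)
        rw [Bool.or_eq_true, PySem.Set.contains_iff, pv_mem_sources]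
        exact Or.inr this
    · intro h x hx
      rw [PySem.Set.mem_diff, PySem.Set.mem_ofList, PySem.Set.mem_ofList] at hx
      obtain ⟨hxp, hxne⟩ := hx
      have := h x hxp
      rw [Bool.or_eq_true, PySem.Set.contains_iff, pv_mem_sources] at this
      rcases this with heq | hedge
      · exact absurd (eq_of_beq heq).symm (by simpa using hxne)
      · exact (hmem p hp x).mpr hedge
  show find_anchor_py proteins dps = find_anchor_py_alt proteins dps
  unfold find_anchor_py find_anchor_py_alt
  simp only [← hst, pv_elim_fold, pv_coverA_find]
  rw [pv_find_congr _ _ proteins hcond, pv_find_eq_head_filter]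
  cases hflt : proteins.filter (fun p => proteins.all (fun q => p == q ||
      PySem.Set.contains
        (PySem.Set.ofList ((dps.filter (fun ab => ab.2 == q)).map (·.1))) p)) with
  | cons p rest => rfl
  | nil =>
    simp only [List.head?_nil]
    cases hps : proteins with
    | nil => exact absurd hps hpre
    | cons h t =>
      set g : String → Int := fun p => (dps.countP (fun ab => ab.1 == p) : Int) with hg
      have hcnt : ∀ p, (dps.foldl (fun d ab => d.insert ab.1 (d.getD ab.1 0 + 1))
          PySem.Dict.empty).getD p 0 = g p := fun p => pv_counts_getD dps p
      simp only [pvPyMax, hcnt, List.foldl_cons]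
      rw [if_pos (by simp only [hg]; omega), pv_fold_max_pair]
      exact pv_max_congr _ _ t h
        (fun x hx => hkey x (hps ▸ List.mem_cons_of_mem _ hx))
        (hkey h (hps ▸ List.mem_cons_self))
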